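-- pv_equiv track=rewrite | github.com/gblmiranda/algorithms | algorithms/dynamic_programming/lcs.py | _lcs_matrix
-- ===== SOURCE A (Python) =====
-- def _lcs_matrix(word1, word2):
--     """
--     Create the LCS matrix
--
--     |   |   | A | G | C | A | T |
--     |---|---|---|---|---|---|---|
--     |   | 0 | 0 | 0 | 0 | 0 | 0 |
--     | G | 0 | 0 | 1 | 1 | 1 | 1 |
--     | A | 0 | 1 | 1 | 1 | 2 | 2 |
--     | C | 0 | 1 | 1 | 2 | 2 | 2 |
--     """
--
--     # Initialize the matrix with zeros
--     matrix = [[ 0 for i in range(len(word2) + 1)] for j in range(len(word1) + 1)]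
--
--     for i, a in enumerate(word1):
--         for j, b in enumerate(word2):
--             if a == b:
--                 matrix[i+1][j+1] = matrix[i][j] + 1
--             else:
--                 matrix[i+1][j+1] = max(matrix[i][j+1], matrix[i+1][j])
--     return matrix
-- ===== SOURCE B (Python) =====
-- def _lcs_matrix(word1, word2):
--     """Top-down memoized recursion on the LCS recurrence; the table is read off cell by cell."""
--     memo = {}
--
--     def lcs(i, j):
--         if i == 0 or j == 0:
--             return 0
--         if (i, j) in memo:
--             return memo[(i, j)]
--         if word1[i - 1] == word2[j - 1]:
--             r = lcs(i - 1, j - 1) + 1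
--         else:
--             r = max(lcs(i - 1, j), lcs(i, j - 1))
--         memo[(i, j)] = r
--         return r
--
--     return [[lcs(i, j) for j in range(len(word2) + 1)]
--             for i in range(len(word1) + 1)]
-- ===== Notes on version B (the rewrite author's own statement) =====
-- stated objective: alternative
-- what changed: B replaces A's bottom-up double loop that mutates a preallocated matrix by top-down memoized recursion on the LCS recurrence (lcs(i,j) with a dict memo), reading the table off cell by cell.
import Mathlib
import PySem

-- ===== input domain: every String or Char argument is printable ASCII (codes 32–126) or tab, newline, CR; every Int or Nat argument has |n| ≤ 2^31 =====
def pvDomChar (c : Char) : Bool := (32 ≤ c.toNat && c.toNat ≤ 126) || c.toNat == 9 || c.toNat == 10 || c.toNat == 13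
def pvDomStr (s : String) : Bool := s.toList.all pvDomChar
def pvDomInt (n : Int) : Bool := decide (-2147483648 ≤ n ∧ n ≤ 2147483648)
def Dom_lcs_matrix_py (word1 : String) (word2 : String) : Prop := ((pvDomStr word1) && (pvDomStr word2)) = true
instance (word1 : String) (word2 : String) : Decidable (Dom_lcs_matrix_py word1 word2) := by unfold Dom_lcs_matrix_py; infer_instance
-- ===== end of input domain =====

-- B computes the same LCS table by top-down memoized recursion on the LCS recurrence instead of
-- A's bottom-up double loop mutating a preallocated matrix; same return value, proved below.

-- ===== PORT A =====
-- inner-loop body: 'matrix[i+1][j+1] = matrix[i][j]+1 if a==b else max(matrix[i][j+1], matrix[i+1][j])'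
-- (indices i, j come from enumerate and are always in range, so pyGetD/pySetD are exact here)
def pvInnerStepA (a : Char) (i : Int) (m : List (List Int)) (jb : Int × Char) : List (List Int) :=
  if a == jb.2 then
    PySem.List.pySetD m (i + 1)
      (PySem.List.pySetD (PySem.List.pyGetD m (i + 1) []) (jb.1 + 1)
        (PySem.List.pyGetD (PySem.List.pyGetD m i []) jb.1 0 + 1))
  else
    PySem.List.pySetD m (i + 1)
      (PySem.List.pySetD (PySem.List.pyGetD m (i + 1) []) (jb.1 + 1)
        (max (PySem.List.pyGetD (PySem.List.pyGetD m i []) (jb.1 + 1) 0)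
             (PySem.List.pyGetD (PySem.List.pyGetD m (i + 1) []) jb.1 0)))

-- outer-loop body: 'for j, b in enumerate(word2): …'
def pvOuterStepA (w2 : List Char) (m : List (List Int)) (ia : Int × Char) : List (List Int) :=
  (PySem.List.enumerate w2 0).foldl (pvInnerStepA ia.2 ia.1) m

def lcs_matrix_py (word1 : String) (word2 : String) : List (List Int) :=
  let w1 := word1.toList
  let w2 := word2.toList
  -- matrix = [[0 for i in range(len(word2)+1)] for j in range(len(word1)+1)]
  let matrix : List (List Int) :=
    (PySem.List.pyRange 0 ((w1.length : Int) + 1) 1).map (fun _ =>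
      (PySem.List.pyRange 0 ((w2.length : Int) + 1) 1).map (fun _ => (0 : Int)))
  (PySem.List.enumerate w1 0).foldl (pvOuterStepA w2) matrix

-- ===== PORT B =====
-- the memoized recursive helper 'def lcs(i, j)' of Source B, with the memo dict threaded explicitly
-- (i, j in the actual calls are always ≥ 0 and in range, so Nat indices and getD are exact)
def pvLcsM (w1 w2 : List Char) (i j : Nat) (memo : PySem.Dict (Nat × Nat) Int) :
    Int × PySem.Dict (Nat × Nat) Int :=
  if _h : i = 0 ∨ j = 0 then (0, memo)
  else
    match memo.get? (i, j) with
    | some v => (v, memo)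
    | none =>
      if w1.getD (i - 1) ' ' == w2.getD (j - 1) ' ' then
        let p := pvLcsM w1 w2 (i - 1) (j - 1) memo
        (p.1 + 1, p.2.insert (i, j) (p.1 + 1))
      else
        let p1 := pvLcsM w1 w2 (i - 1) j memo
        let p2 := pvLcsM w1 w2 i (j - 1) p1.2
        (max p1.1 p2.1, p2.2.insert (i, j) (max p1.1 p2.1))
termination_by i + j
decreasing_by all_goals omega

-- '[[lcs(i, j) for j in range(len(word2)+1)] for i in range(len(word1)+1)]', memo threaded in order
def lcs_matrix_py_alt (word1 : String) (word2 : String) : List (List Int) :=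
  let w1 := word1.toList
  let w2 := word2.toList
  ((List.range (w1.length + 1)).foldl
    (fun (st : List (List Int) × PySem.Dict (Nat × Nat) Int) i =>
      let inner := (List.range (w2.length + 1)).foldl
        (fun (st2 : List Int × PySem.Dict (Nat × Nat) Int) j =>
          let p := pvLcsM w1 w2 i j st2.2
          (st2.1 ++ [p.1], p.2)) ([], st.2)
      (st.1 ++ [inner.1], inner.2)) ([], PySem.Dict.empty)).1

-- ===== PRECONDITION & SPEC =====
def Spec_lcs_matrix_py (word1 : String) (word2 : String) (out : List (List Int)) : Prop := out = lcs_matrix_py_alt word1 word2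
instance (word1 : String) (word2 : String) (out : List (List Int)) : Decidable (Spec_lcs_matrix_py word1 word2 out) := by unfold Spec_lcs_matrix_py; infer_instance

-- ===== CLAIM (what is proved, stated in full; the proofs are below) =====
def Claim_equal_lcs_matrix_py : Prop := ∀ (word1 : String) (word2 : String), Dom_lcs_matrix_py word1 word2 → Spec_lcs_matrix_py word1 word2 (lcs_matrix_py word1 word2)

-- ===== LEMMAS AND PROOFS =====

-- the mathematical LCS table cell (proof vehicle, used by neither port)
def pvL (w1 w2 : List Char) : Nat → Nat → Int
  | 0, _ => 0
  | _ + 1, 0 => 0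
  | i + 1, j + 1 =>
    if w1.getD i ' ' == w2.getD j ' ' then pvL w1 w2 i j + 1
    else max (pvL w1 w2 i (j + 1)) (pvL w1 w2 (i + 1) j)
termination_by i j => i + j
decreasing_by all_goals omega

@[simp] lemma pvL_zero_left (w1 w2 : List Char) (j : Nat) : pvL w1 w2 0 j = 0 := by
  cases j <;> simp [pvL]

@[simp] lemma pvL_zero_right (w1 w2 : List Char) (i : Nat) : pvL w1 w2 i 0 = 0 := by
  cases i <;> simp [pvL]

lemma pvL_succ (w1 w2 : List Char) (i j : Nat) :
    pvL w1 w2 (i + 1) (j + 1) =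
      if w1.getD i ' ' == w2.getD j ' ' then pvL w1 w2 i j + 1
      else max (pvL w1 w2 i (j + 1)) (pvL w1 w2 (i + 1) j) := by
  rw [pvL]

-- row i of the table
def pvRow (w1 w2 : List Char) (i : Nat) : List Int :=
  (List.range (w2.length + 1)).map (pvL w1 w2 i)

-- ---------- B side: the memoized recursion computes pvL ----------

def pvInv (w1 w2 : List Char) (m : PySem.Dict (Nat × Nat) Int) : Prop :=
  ∀ i j v, m.get? (i, j) = some v → v = pvL w1 w2 i j

lemma pvInv_empty (w1 w2 : List Char) : pvInv w1 w2 PySem.Dict.empty := by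
  intro i j v h; simp [PySem.Dict.get?_empty] at h

lemma pvInv_insert (w1 w2 : List Char) (m : PySem.Dict (Nat × Nat) Int) (i j : Nat)
    (hm : pvInv w1 w2 m) (v : Int)
    (hval : v = pvL w1 w2 i j) : pvInv w1 w2 (m.insert (i, j) v) := by
  intro i' j' v' h
  rw [PySem.Dict.get?_insert] at h
  by_cases hk : ((i', j') : Nat × Nat) = (i, j)
  · have hi : i' = i := congrArg Prod.fst hk
    have hj : j' = j := congrArg Prod.snd hk
    subst hi; subst hj
    rw [if_pos rfl] at h
    exact (Option.some.inj h) ▸ hval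
  · rw [if_neg hk] at h
    exact hm i' j' v' h

lemma pvLcsM_spec (w1 w2 : List Char) :
    ∀ (n i j : Nat) (m : PySem.Dict (Nat × Nat) Int), i + j ≤ n → pvInv w1 w2 m →
      (pvLcsM w1 w2 i j m).1 = pvL w1 w2 i j ∧ pvInv w1 w2 (pvLcsM w1 w2 i j m).2 := by
  intro n
  induction n with
  | zero =>
    intro i j m hle hm
    have hi : i = 0 := by omega
    subst hi
    rw [pvLcsM]
    simp [hm]
  | succ n ih =>
    intro i j m hle hm
    rw [pvLcsM]
    by_cases h0 : i = 0 ∨ j = 0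
    · rw [dif_pos h0]
      refine ⟨?_, hm⟩
      rcases h0 with rfl | rfl <;> simp
    · rw [dif_neg h0]
      obtain ⟨i', rfl⟩ : ∃ i', i = i' + 1 := ⟨i - 1, by omega⟩
      obtain ⟨j', rfl⟩ : ∃ j', j = j' + 1 := ⟨j - 1, by omega⟩
      cases hmem : m.get? (i' + 1, j' + 1) with
      | some v => exact ⟨hm _ _ _ hmem, hm⟩
      | none =>
        simp only [Nat.add_sub_cancel]
        rw [pvL_succ]
        by_cases hc : (w1.getD i' ' ' == w2.getD j' ' ') = true
        · rw [if_pos hc, if_pos hc]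
          obtain ⟨h1, h2⟩ := ih i' j' m (by omega) hm
          refine ⟨by rw [h1], ?_⟩
          exact pvInv_insert _ _ _ _ _ h2 _ (by rw [h1, pvL_succ, if_pos hc])
        · rw [if_neg hc, if_neg hc]
          obtain ⟨h1, h2⟩ := ih i' (j' + 1) m (by omega) hm
          obtain ⟨h3, h4⟩ := ih (i' + 1) j' _ (by omega) h2
          refine ⟨by rw [h1, h3], ?_⟩
          exact pvInv_insert _ _ _ _ _ h4 _ (by rw [h1, h3, pvL_succ, if_neg hc])

-- inner comprehension builds row i
lemma pvB_inner (w1 w2 : List Char) (i : Nat) :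
    ∀ (js : List Nat) (acc : List Int) (m : PySem.Dict (Nat × Nat) Int), pvInv w1 w2 m →
      (js.foldl (fun (st2 : List Int × PySem.Dict (Nat × Nat) Int) j =>
          let p := pvLcsM w1 w2 i j st2.2
          (st2.1 ++ [p.1], p.2)) (acc, m)).1 = acc ++ js.map (pvL w1 w2 i) ∧
      pvInv w1 w2 (js.foldl (fun (st2 : List Int × PySem.Dict (Nat × Nat) Int) j =>
          let p := pvLcsM w1 w2 i j st2.2
          (st2.1 ++ [p.1], p.2)) (acc, m)).2 := by
  intro js
  induction js with
  | nil => intro acc m hm; exact ⟨by simp, hm⟩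
  | cons j js ih =>
    intro acc m hm
    obtain ⟨h1, h2⟩ := pvLcsM_spec w1 w2 (i + j) i j m le_rfl hm
    simp only [List.foldl_cons]
    obtain ⟨h3, h4⟩ := ih (acc ++ [(pvLcsM w1 w2 i j m).1]) (pvLcsM w1 w2 i j m).2 h2
    refine ⟨?_, h4⟩
    rw [h3, h1]
    simp

-- outer comprehension builds all rows
lemma pvB_outer (w1 w2 : List Char) :
    ∀ (is_ : List Nat) (acc : List (List Int)) (m : PySem.Dict (Nat × Nat) Int), pvInv w1 w2 m →
      (is_.foldl (fun (st : List (List Int) × PySem.Dict (Nat × Nat) Int) i =>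
          let inner := (List.range (w2.length + 1)).foldl
            (fun (st2 : List Int × PySem.Dict (Nat × Nat) Int) j =>
              let p := pvLcsM w1 w2 i j st2.2
              (st2.1 ++ [p.1], p.2)) ([], st.2)
          (st.1 ++ [inner.1], inner.2)) (acc, m)).1 = acc ++ is_.map (pvRow w1 w2) := by
  intro is_
  induction is_ with
  | nil => intro acc m hm; simp
  | cons i is_ ih =>
    intro acc m hm
    simp only [List.foldl_cons]
    obtain ⟨h1, h2⟩ := pvB_inner w1 w2 i (List.range (w2.length + 1)) [] m hm
    rw [ih _ _ h2, h1]
    simp [pvRow]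

lemma pvB_eq (word1 word2 : String) :
    lcs_matrix_py_alt word1 word2 =
      (List.range (word1.toList.length + 1)).map (pvRow word1.toList word2.toList) := by
  unfold lcs_matrix_py_alt
  rw [pvB_outer word1.toList word2.toList (List.range (word1.toList.length + 1)) []
      PySem.Dict.empty (pvInv_empty _ _)]
  simp

-- ---------- A side ----------

-- the rows A's loops produce after the initial all-zero row, as a plain recursion
def pvRowStepB (a : Char) (prev : List Int) (row : List Int) (jb : Int × Char) : List Int :=
  row ++ [if a == jb.2 then PySem.List.pyGetD prev jb.1 0 + 1
          else max (PySem.List.pyGetD prev (jb.1 + 1) 0) (PySem.List.pyGetD row jb.1 0)]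

def pvRowB (a : Char) (prev : List Int) (w2 : List Char) : List Int :=
  (PySem.List.enumerate w2 0).foldl (pvRowStepB a prev) [0]

def pvRowsB (w2 : List Char) (p : List Int) : List Char → List (List Int)
  | [] => []
  | a :: as => pvRowB a p w2 :: pvRowsB w2 (pvRowB a p w2) as

-- list-surgery helpers for the matrix shape pre ++ p :: cur :: suf
lemma pvGetD_append_length {α : Type} [Inhabited α] (l t : List α) (x d : α) :
    (l ++ x :: t).getD l.length d = x := by
  simp [List.getD_eq_getElem?_getD]

lemma pvSet_append_length {α : Type} (l t : List α) (x v : α) :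
    (l ++ x :: t).set l.length v = l ++ v :: t := by
  induction l with
  | nil => simp
  | cons h l ih => simp [ih]

-- inner loop, generalized: processing the tail of word2 from index s, with the current
-- row r (length s+1) followed by still-untouched zeros, rewrites exactly row i+1
lemma pvInner (a : Char) (bs : List Char) :
    ∀ (s : Nat) (p r : List Int) (pre suf : List (List Int)),
    r.length = s + 1 →
    (PySem.List.enumerate bs (s : Int)).foldl (pvInnerStepA a (pre.length : Int))
        (pre ++ p :: (r ++ List.replicate bs.length 0) :: suf)
    = pre ++ p :: ((PySem.List.enumerate bs (s : Int)).foldl (pvRowStepB a p) r) :: suf := by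
  induction bs with
  | nil => intro s p r pre suf hr; simp [PySem.List.enumerate_nil]
  | cons b bs ih =>
    intro s p r pre suf hr
    rw [PySem.List.enumerate_cons]
    have hcast1 : (s : Int) + 1 = ((s + 1 : Nat) : Int) := by push_cast; ring
    have hcast2 : (pre.length : Int) + 1 = ((pre.length + 1 : Nat) : Int) := by push_cast; ring
    simp only [List.foldl_cons]
    have hstepA :
        pvInnerStepA a (pre.length : Int)
            (pre ++ p :: (r ++ List.replicate (b :: bs).length 0) :: suf) ((s : Int), b)
          = pre ++ p :: ((r ++ [if a == b then p.getD s 0 + 1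
                else max (p.getD (s + 1) 0) (r.getD s 0)]) ++ List.replicate bs.length 0) :: suf := by
      have hm1 : (pre ++ p :: (r ++ List.replicate (b :: bs).length 0) :: suf).getD pre.length []
          = p := pvGetD_append_length pre _ p []
      have hm2 : (pre ++ p :: (r ++ List.replicate (b :: bs).length 0) :: suf).getD (pre.length + 1) []
          = r ++ List.replicate (b :: bs).length 0 := by
        simp [List.getD_eq_getElem?_getD]
      have hcur : (r ++ List.replicate (b :: bs).length 0).getD s 0 = r.getD s 0 :=
        List.getD_append r _ 0 s (by omega)
      have hset : ∀ v : Int, (r ++ List.replicate (b :: bs).length 0).set (s + 1) v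
          = (r ++ [v]) ++ List.replicate bs.length 0 := by
        intro v
        have := pvSet_append_length r (List.replicate bs.length 0) (0 : Int) v
        rw [hr] at this
        simp only [List.length_cons, List.replicate_succ, List.append_assoc, List.cons_append,
          List.nil_append]
        exact this
      have hsetm : ∀ row : List Int,
          (pre ++ p :: (r ++ List.replicate (b :: bs).length 0) :: suf).set (pre.length + 1) row
          = pre ++ p :: row :: suf := by
        intro row
        have := pvSet_append_length (pre ++ [p]) suf (r ++ List.replicate (b :: bs).length 0) row
        simp only [List.length_append, List.length_cons, List.length_nil, List.append_assoc,
          List.cons_append, List.nil_append] at this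
        exact this
      simp only [pvInnerStepA, hcast1, hcast2, PySem.List.pyGetD_natCast, PySem.List.pySetD_natCast,
        hm1, hm2, hcur, hset, hsetm]
      split_ifs <;> simp
    have hstepB : pvRowStepB a p r ((s : Int), b)
        = r ++ [if a == b then p.getD s 0 + 1 else max (p.getD (s + 1) 0) (r.getD s 0)] := by
      simp only [pvRowStepB, hcast1, PySem.List.pyGetD_natCast]
    rw [hstepA, hstepB, hcast1]
    exact ih (s + 1) p _ pre suf (by simp; omega)

-- outer loop, generalized
lemma pvOuter (w2 : List Char) (as : List Char) :
    ∀ (acc : List (List Int)) (p : List Int),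
    (PySem.List.enumerate as (acc.length : Int)).foldl (pvOuterStepA w2)
        (acc ++ p :: List.replicate as.length (List.replicate (w2.length + 1) 0))
    = acc ++ p :: pvRowsB w2 p as := by
  induction as with
  | nil => intro acc p; simp [PySem.List.enumerate_nil, pvRowsB]
  | cons a as ih =>
    intro acc p
    rw [PySem.List.enumerate_cons]
    simp only [List.foldl_cons, List.length_cons, List.replicate_succ]
    have hstep : pvOuterStepA w2
        (acc ++ p :: (0 :: List.replicate w2.length 0) ::
          List.replicate as.length (0 :: List.replicate w2.length 0)) ((acc.length : Int), a)
      = acc ++ p :: pvRowB a p w2 ::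
          List.replicate as.length (0 :: List.replicate w2.length 0) := by
      have := pvInner a w2 0 p [0] acc
        (List.replicate as.length (0 :: List.replicate w2.length 0)) (by simp)
      simp only [pvOuterStepA, pvRowB]
      simpa [List.replicate_succ] using this
    rw [hstep]
    have hlen : (acc.length : Int) + 1 = (((acc ++ [p]).length : Nat) : Int) := by simp
    rw [hlen]
    have := ih (acc ++ [p]) (pvRowB a p w2)
    simpa [pvRowsB] using this

lemma pvA_rows (word1 word2 : String) :
    lcs_matrix_py word1 word2 =
      List.replicate (word2.toList.length + 1) 0 ::
        pvRowsB word2.toList (List.replicate (word2.toList.length + 1) 0) word1.toList := by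
  simp only [lcs_matrix_py]
  have hmat : (PySem.List.pyRange 0 ((word1.toList.length : Int) + 1) 1).map
      (fun _ => (PySem.List.pyRange 0 ((word2.toList.length : Int) + 1) 1).map (fun _ => (0 : Int)))
      = List.replicate (word1.toList.length + 1) (List.replicate (word2.toList.length + 1) 0) := by
    rw [PySem.List.pyRange_one, PySem.List.pyRange_one]
    simp [Function.comp_def, List.map_const']
  rw [hmat]
  have := pvOuter word2.toList word1.toList [] (List.replicate (word2.toList.length + 1) 0)
  simpa [List.replicate_succ] using this

-- ---------- A's rows are pvL rows ----------

lemma pvRow_zero (w1 w2 : List Char) : pvRow w1 w2 0 = List.replicate (w2.length + 1) 0 := by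
  unfold pvRow
  rw [show (pvL w1 w2 0) = (fun _ => (0 : Int)) from funext (pvL_zero_left w1 w2)]
  simp [List.map_const']

lemma pvRow_getD (w1 w2 : List Char) (i j : Nat) (h : j ≤ w2.length) :
    (pvRow w1 w2 i).getD j 0 = pvL w1 w2 i j := by
  simp [pvRow, List.getD_eq_getElem?_getD, Nat.lt_succ_of_le h]

lemma pvRowB_inner (w1 w2 : List Char) (i : Nat) :
    ∀ (bs : List Char) (s : Nat) (r : List Int),
      bs = w2.drop s → s ≤ w2.length →
      r = (List.range (s + 1)).map (pvL w1 w2 (i + 1)) →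
      (PySem.List.enumerate bs (s : Int)).foldl (pvRowStepB (w1.getD i ' ') (pvRow w1 w2 i)) r
        = pvRow w1 w2 (i + 1) := by
  intro bs
  induction bs with
  | nil =>
    intro s r hbs hs hr
    have hlen : s = w2.length := by
      have := congrArg List.length hbs; simp at this; omega
    subst hlen
    simp [PySem.List.enumerate_nil, hr, pvRow]
  | cons b bs ih =>
    intro s r hbs hs hr
    have hget : w2[s]? = some b := by
      have h0 : (w2.drop s)[0]? = some b := by rw [← hbs]; simp
      rwa [List.getElem?_drop, Nat.add_zero] at h0
    have hslt : s < w2.length := (List.getElem?_eq_some_iff.mp hget).1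
    have hb : w2.getD s ' ' = b := by
      simp [List.getD_eq_getElem?_getD, hget]
    rw [PySem.List.enumerate_cons]
    simp only [List.foldl_cons]
    have hcast1 : (s : Int) + 1 = ((s + 1 : Nat) : Int) := by push_cast; ring
    have hstep : pvRowStepB (w1.getD i ' ') (pvRow w1 w2 i) r ((s : Int), b)
        = r ++ [pvL w1 w2 (i + 1) (s + 1)] := by
      simp only [pvRowStepB, hcast1, PySem.List.pyGetD_natCast]
      rw [pvRow_getD w1 w2 i s (le_of_lt hslt), pvRow_getD w1 w2 i (s + 1) hslt,
        hr]
      have hrget : ((List.range (s + 1)).map (pvL w1 w2 (i + 1))).getD s 0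
          = pvL w1 w2 (i + 1) s := by
        simp [List.getD_eq_getElem?_getD]
      rw [hrget, pvL_succ, hb]
    rw [hstep, hcast1]
    refine ih (s + 1) _ ?_ hslt ?_
    · rw [← List.drop_drop, ← hbs]; simp
    · rw [hr]
      simp [List.range_succ]

lemma pvRowB_eq (w1 w2 : List Char) (i : Nat) :
    pvRowB (w1.getD i ' ') (pvRow w1 w2 i) w2 = pvRow w1 w2 (i + 1) := by
  unfold pvRowB
  have := pvRowB_inner w1 w2 i w2 0 [0] (by simp) (Nat.zero_le _) (by simp)
  simpa using this

lemma pvRowsB_spec (w1 w2 : List Char) :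
    ∀ (as : List Char) (i : Nat), as = w1.drop i →
      pvRowsB w2 (pvRow w1 w2 i) as
        = (List.range as.length).map (fun k => pvRow w1 w2 (i + 1 + k)) := by
  intro as
  induction as with
  | nil => intro i h; simp [pvRowsB]
  | cons a as ih =>
    intro i h
    have hget : w1[i]? = some a := by
      have h0 : (w1.drop i)[0]? = some a := by rw [← h]; simp
      rwa [List.getElem?_drop, Nat.add_zero] at h0
    have ha : w1.getD i ' ' = a := by simp [List.getD_eq_getElem?_getD, hget]
    have hdrop : as = w1.drop (i + 1) := by
      rw [← List.drop_drop, ← h]; simp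
    simp only [pvRowsB]
    rw [← ha, pvRowB_eq, ih (i + 1) hdrop]
    rw [List.length_cons, List.range_succ_eq_map]
    simp only [List.map_cons, List.map_map, Nat.add_zero]
    congr 1
    apply List.map_congr_left
    intro k _
    simp only [Function.comp_apply]
    congr 1
    omega

-- ===== VERDICT (by name: the statement is the Claim_ definition above) =====
theorem lcs_matrix_py_spec : Claim_equal_lcs_matrix_py := by
  intro word1 word2 _
  unfold Spec_lcs_matrix_py
  rw [pvA_rows, pvB_eq]
  rw [← pvRow_zero word1.toList word2.toList]
  rw [pvRowsB_spec word1.toList word2.toList word1.toList 0 (by simp)]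
  rw [List.range_succ_eq_map]
  simp [Function.comp_def, Nat.add_comm]
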